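-- pv_equiv track=rewrite | github.com/hendrawanap/didow-ml-api | main.py | check_prediction
-- ===== SOURCE A (Python) =====
-- def check_prediction(expected: str, predict: str):
--     output = [char for char in expected]
--     for i in predict:
--         try:
--             output.remove(i.lower())
--         except:
--             pass
--     is_correct = len(output) == 0
--     predicted = [char for char in expected]
--     for i in output:
--         try:
--             predicted.remove(i.lower())
--         except:
--             pass
--     predicted = ''.join(predicted)
--     return is_correct, predicted
-- ===== SOURCE B (Python) =====
-- def check_prediction(expected: str, predict: str):
--     E = {}
--     for c in expected:
--         E[c] = E.get(c, 0) + 1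
--     P = {}
--     for c in predict:
--         k = c.lower()
--         P[k] = P.get(k, 0) + 1
--     leftover = {c: n - min(n, P.get(c, 0)) for c, n in E.items()}
--     is_correct = sum(leftover.values()) == 0
--     R = {}
--     for c, n in leftover.items():
--         k = c.lower()
--         R[k] = R.get(k, 0) + n
--     skip = {v: min(E.get(v, 0), n) for v, n in R.items()}
--     kept = []
--     for c in expected:
--         if skip.get(c, 0) > 0:
--             skip[c] -= 1
--         else:
--             kept.append(c)
--     return is_correct, ''.join(kept)
-- ===== Notes on version B (the rewrite author's own statement) =====
-- stated objective: faster
-- what changed: Replaces A's two quadratic passes of repeated list.remove over predict and over the leftover list by counting dictionaries (expected counts, lowercased predict counts, leftover counts, per-char removal budgets) and one linear skip-budget pass over expected that keeps the last surviving occurrences.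
import Mathlib
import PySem

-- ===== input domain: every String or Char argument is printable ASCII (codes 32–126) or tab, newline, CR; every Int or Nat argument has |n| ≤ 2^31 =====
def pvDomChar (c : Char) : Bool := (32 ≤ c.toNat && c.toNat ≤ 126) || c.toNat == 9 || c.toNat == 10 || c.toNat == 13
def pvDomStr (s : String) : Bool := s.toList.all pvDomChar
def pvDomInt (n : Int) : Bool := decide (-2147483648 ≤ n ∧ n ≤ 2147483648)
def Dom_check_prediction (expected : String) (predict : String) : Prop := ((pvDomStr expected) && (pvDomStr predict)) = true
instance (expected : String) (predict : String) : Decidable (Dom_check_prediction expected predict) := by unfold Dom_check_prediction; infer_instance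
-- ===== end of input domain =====

-- B replaces A's quadratic repeated list.remove passes by counting dictionaries and a single
-- skip-budget pass over `expected` (objective: faster, asymptotically on large alphabet-light inputs).

-- ===== PORT A =====
-- the shared loop body 'try: lst.remove(i.lower()) except: pass'
def pvStepA (out : List Char) (i : Char) : List Char :=
  match PySem.List.remove? out (PySem.Chars.lowerChar i) with
  | some l => l
  | none => out

def check_prediction (expected : String) (predict : String) : Bool × String :=
  let output := predict.toList.foldl pvStepA expected.toList
  let is_correct := output.length == 0
  let predicted := output.foldl pvStepA expected.toList
  (is_correct, String.mk predicted)

-- ===== PORT B =====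
def check_prediction_alt (expected : String) (predict : String) : Bool × String :=
  let E := expected.toList.foldl (fun d c => d.insert c (d.getD c 0 + 1)) (PySem.Dict.empty : PySem.Dict Char Int)
  let P := predict.toList.foldl
    (fun d c => d.insert (PySem.Chars.lowerChar c) (d.getD (PySem.Chars.lowerChar c) 0 + 1))
    (PySem.Dict.empty : PySem.Dict Char Int)
  let leftover := E.items.foldl
    (fun d p => d.insert p.1 (p.2 - min p.2 (P.getD p.1 0))) (PySem.Dict.empty : PySem.Dict Char Int)
  let is_correct := leftover.values.sum == 0
  let R := leftover.items.foldl
    (fun d p => d.insert (PySem.Chars.lowerChar p.1) (d.getD (PySem.Chars.lowerChar p.1) 0 + p.2))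
    (PySem.Dict.empty : PySem.Dict Char Int)
  let skip := R.items.foldl
    (fun d p => d.insert p.1 (min (E.getD p.1 0) p.2)) (PySem.Dict.empty : PySem.Dict Char Int)
  let kept := expected.toList.foldl
    (fun st c => if st.1.getD c 0 > 0 then (st.1.insert c (st.1.getD c 0 - 1), st.2) else (st.1, st.2 ++ [c]))
    ((skip, ([] : List Char)))
  (is_correct, String.mk kept.2)

-- ===== PRECONDITION & SPEC =====
def Spec_check_prediction (expected : String) (predict : String) (out : Bool × String) : Prop := out = check_prediction_alt expected predict
instance (expected : String) (predict : String) (out : Bool × String) : Decidable (Spec_check_prediction expected predict out) := by unfold Spec_check_prediction; infer_instance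

-- ===== CLAIM (what is proved, stated in full; the proofs are below) =====
def Claim_equal_check_prediction : Prop := ∀ (expected : String) (predict : String), Dom_check_prediction expected predict → Spec_check_prediction expected predict (check_prediction expected predict)

-- ===== LEMMAS AND PROOFS =====

-- 'pvDrop f xs' drops, for every char c, the first (f c).toNat occurrences of c from xs.
def pvDrop : (Char → Int) → List Char → List Char
  | _, [] => []
  | f, c :: xs => if f c ≤ 0 then c :: pvDrop f xs else pvDrop (fun d => if d = c then f c - 1 else f d) xs

theorem remove_pvDrop (xs : List Char) (f : Char → Int) (hf : ∀ c, 0 ≤ f c) (j : Char) :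
    PySem.List.remove? (pvDrop f xs) j =
      if f j < (xs.count j : Int) then some (pvDrop (fun d => if d = j then f j + 1 else f d) xs)
      else none := by
  induction xs generalizing f with
  | nil =>
      have h0 : ¬ f j < ((List.count j ([] : List Char) : Nat) : Int) := by
        simp; exact hf j
      rw [if_neg h0, show pvDrop f [] = [] from rfl]
      exact (PySem.List.remove?_eq_none_iff _ _).mpr (by simp)
  | cons a xs ih =>
      by_cases hfa : f a ≤ 0
      · have ha0 : f a = 0 := le_antisymm hfa (hf a)
        by_cases hja : a = j
        · subst hja
          have hcond : f a < ((a :: xs).count a : Int) := by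
            simp [List.count_cons_self, ha0]
          rw [pvDrop]
          simp only [if_pos hfa]
          rw [PySem.List.remove?_cons_self, if_pos hcond]
          congr 1
          conv_rhs => rw [pvDrop]
          have h1 : ¬ (if a = a then f a + 1 else f a) ≤ 0 := by simp [ha0]
          rw [if_neg h1]
          congr 1
          funext d
          by_cases hd : d = a <;> simp [hd, ha0]
        · rw [pvDrop]
          simp only [if_pos hfa]
          rw [PySem.List.remove?_cons_of_ne _ hja, ih f hf]
          have hcnt : ((a :: xs).count j : Int) = (xs.count j : Int) := by
            rw [List.count_cons_of_ne hja]
          by_cases hc : f j < (xs.count j : Int)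
          · rw [if_pos hc, if_pos (by rw [hcnt]; exact hc)]
            simp only [Option.map_some]
            congr 1
            conv_rhs => rw [pvDrop]
            rw [if_pos (show (if a = j then f j + 1 else f a) ≤ 0 by rw [if_neg hja]; exact hfa)]
          · rw [if_neg hc, if_neg (by rw [hcnt]; exact hc)]
            simp
      · have hg : ∀ c, 0 ≤ (fun d => if d = a then f a - 1 else f d) c := by
          intro c; by_cases hc : c = a <;> simp [hc] <;> [omega; exact hf c]
        rw [pvDrop]
        simp only [if_neg hfa]
        rw [ih _ hg]
        by_cases hja : j = a
        · subst hja
          have hcnt : ((j :: xs).count j : Int) = (xs.count j : Int) + 1 := by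
            push_cast [List.count_cons_self]; ring
          simp only [eq_self_iff_true, if_true]
          by_cases hc : f j - 1 < (xs.count j : Int)
          · rw [if_pos hc, if_pos (by rw [hcnt]; omega)]
            congr 1
            conv_rhs => rw [pvDrop]
            rw [if_neg (by simp; omega)]
            congr 1
            funext d
            by_cases hd : d = j <;> simp [hd]
          · rw [if_neg hc, if_neg (by rw [hcnt]; omega)]
        · have hcnt : ((a :: xs).count j : Int) = (xs.count j : Int) := by
            rw [List.count_cons_of_ne (Ne.symm hja)]
          simp only [if_neg hja]
          by_cases hc : f j < (xs.count j : Int)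
          · rw [if_pos hc, if_pos (by rw [hcnt]; exact hc)]
            congr 1
            conv_rhs => rw [pvDrop]
            rw [if_neg (by simpa [Ne.symm hja] using hfa)]
            congr 1
            funext d
            by_cases hd : d = a <;> by_cases hd2 : d = j <;> simp [hd, hd2] at * <;> simp_all
          · rw [if_neg hc, if_neg (by rw [hcnt]; exact hc)]

theorem pvStepA_eq (out : List Char) (i : Char) :
    pvStepA out i = (PySem.List.remove? out (PySem.Chars.lowerChar i)).getD out := by
  unfold pvStepA
  cases h : PySem.List.remove? out (PySem.Chars.lowerChar i) <;> simp

theorem pass_eq (ys xs : List Char) (p : Char → Int) (hp : ∀ v, 0 ≤ p v) :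
    ys.foldl pvStepA (pvDrop (fun v => min ((xs.count v : Int)) (p v)) xs)
      = pvDrop (fun v => min ((xs.count v : Int)) (p v + ((ys.map PySem.Chars.lowerChar).count v : Int))) xs := by
  induction ys generalizing p with
  | nil =>
      simp only [List.foldl_nil, List.map_nil]
      congr 1
      funext v
      simp
  | cons i ys ih =>
      have hf : ∀ c, 0 ≤ min ((xs.count c : Int)) (p c) :=
        fun c => le_min (Int.natCast_nonneg _) (hp c)
      rw [List.foldl_cons]
      have hrem := remove_pvDrop xs _ hf (PySem.Chars.lowerChar i)
      by_cases hc : p (PySem.Chars.lowerChar i) < (xs.count (PySem.Chars.lowerChar i) : Int)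
      · have hcond : min ((xs.count (PySem.Chars.lowerChar i) : Int)) (p (PySem.Chars.lowerChar i))
            < (xs.count (PySem.Chars.lowerChar i) : Int) := min_lt_iff.mpr (Or.inr hc)
        have hstep : pvStepA (pvDrop (fun v => min ((xs.count v : Int)) (p v)) xs) i
            = pvDrop (fun v => min ((xs.count v : Int))
                ((fun w => if w = PySem.Chars.lowerChar i then p w + 1 else p w) v)) xs := by
          rw [pvStepA_eq, hrem, if_pos hcond]
          simp only [Option.getD_some]
          congr 1
          funext d
          by_cases hd : d = PySem.Chars.lowerChar i <;> simp [hd]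
          omega
        rw [hstep, ih _ (fun v => by
          split_ifs with h
          · have := hp v; omega
          · exact hp v)]
        congr 1
        funext v
        by_cases hv : v = PySem.Chars.lowerChar i
        · subst hv
          congr 1
          simp only [List.map_cons, List.count_cons_self, if_pos rfl]
          push_cast
          ring
        · simp only [List.map_cons, List.count_cons_of_ne (Ne.symm hv), if_neg hv]
      · have hcond : ¬ min ((xs.count (PySem.Chars.lowerChar i) : Int)) (p (PySem.Chars.lowerChar i))
            < (xs.count (PySem.Chars.lowerChar i) : Int) := by
          rw [min_eq_left (by omega)]
          exact lt_irrefl _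
        have hstep : pvStepA (pvDrop (fun v => min ((xs.count v : Int)) (p v)) xs) i
            = pvDrop (fun v => min ((xs.count v : Int)) (p v)) xs := by
          rw [pvStepA_eq, hrem, if_neg hcond]
          simp
        rw [hstep, ih _ hp]
        congr 1
        funext v
        by_cases hv : v = PySem.Chars.lowerChar i
        · subst hv
          simp only [List.map_cons, List.count_cons_self]
          push_cast
          rw [min_eq_left (by omega), min_eq_left (by omega)]
        · simp only [List.map_cons, List.count_cons_of_ne (Ne.symm hv)]

theorem pvDrop_zero (xs : List Char) (f : Char → Int) (h : ∀ c, f c ≤ 0) : pvDrop f xs = xs := by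
  induction xs with
  | nil => simp [pvDrop]
  | cons c xs ih => simp [pvDrop, h c, ih]

theorem count_pvDrop (xs : List Char) (f : Char → Int) (hf : ∀ c, 0 ≤ f c) (v : Char) :
    ((pvDrop f xs).count v : Int) = (xs.count v : Int) - min ((xs.count v : Int)) (f v) := by
  induction xs generalizing f with
  | nil => simp [pvDrop, le_antisymm (min_le_left _ _) (le_min (by simp) (hf v))]
  | cons a xs ih =>
      by_cases hfa : f a ≤ 0
      · have ha0 : f a = 0 := le_antisymm hfa (hf a)
        by_cases hva : v = a
        · subst hva
          simp [pvDrop, hfa, List.count_cons_self, ih f hf, ha0]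
          push_cast
          omega
        · simp [pvDrop, hfa, ih f hf, List.count_cons]
          rw [if_neg (fun h => hva h.symm)]
          simp
      · have hg : ∀ c, 0 ≤ (fun d => if d = a then f a - 1 else f d) c := by
          intro c; by_cases hc : c = a <;> simp [hc] <;> [omega; exact hf c]
        by_cases hva : v = a
        · subst hva
          rw [pvDrop]
          simp only [if_neg hfa]
          rw [ih _ hg]
          simp [List.count_cons_self]
          push_cast
          omega
        · rw [pvDrop]
          simp only [if_neg hfa]
          rw [ih _ hg]
          simp [List.count_cons, hva]
          rw [if_neg (fun h => hva h.symm)]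
          simp

theorem mem_pvDrop (xs : List Char) (f : Char → Int) (c : Char) (h : c ∈ pvDrop f xs) : c ∈ xs := by
  induction xs generalizing f with
  | nil => simpa [pvDrop] using h
  | cons a xs ih =>
      by_cases hfa : f a ≤ 0
      · simp [pvDrop, hfa] at h
        rcases h with h | h
        · simp [h]
        · exact List.mem_cons_of_mem _ (ih _ h)
      · simp [pvDrop, hfa] at h
        exact List.mem_cons_of_mem _ (ih _ h)

theorem pvDrop_eq_nil_iff (xs : List Char) (f : Char → Int) (hf : ∀ c, 0 ≤ f c) :
    pvDrop f xs = [] ↔ ∀ c ∈ xs, (xs.count c : Int) ≤ f c := by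
  constructor
  · intro h c hc
    have hcnt := count_pvDrop xs f hf c
    rw [h] at hcnt
    simp only [List.count_nil, Nat.cast_zero] at hcnt
    rcases le_total ((xs.count c : Int)) (f c) with h' | h'
    · exact h'
    · rw [min_eq_right h'] at hcnt
      omega
  · intro h
    by_contra hne
    obtain ⟨c, hc⟩ := List.exists_mem_of_ne_nil _ hne
    have hmem := mem_pvDrop xs f c hc
    have hcnt := count_pvDrop xs f hf c
    rw [min_eq_left (h c hmem)] at hcnt
    have hpos : 0 < (pvDrop f xs).count c := List.count_pos_iff.mpr hc
    omega

theorem pv_sum_indicator (S : List Char) (hS : S.Nodup) (x : Char) (hx : x ∈ S) (w : Char → Int) :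
    (S.map (fun c => if c = x then w c else 0)).sum = w x := by
  induction S with
  | nil => cases hx
  | cons a S ih =>
      rcases List.mem_cons.mp hx with h | h
      · subst h
        have hz : (S.map (fun c => if c = x then w c else 0)).sum = 0 := by
          apply List.sum_eq_zero
          intro y hy
          obtain ⟨c, hcS, rfl⟩ := List.mem_map.mp hy
          rw [if_neg]
          intro hcx
          subst hcx
          exact (List.nodup_cons.mp hS).1 hcS
        simp [hz]
      · have hax : a ≠ x := by
          rintro rfl
          exact (List.nodup_cons.mp hS).1 h
        simp only [List.map_cons, List.sum_cons, if_neg hax]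
        rw [ih (List.nodup_cons.mp hS).2 h, zero_add]

theorem pv_sum_fiber (l S : List Char) (hS : S.Nodup) (hsub : ∀ c ∈ l, c ∈ S) (k : Char → Char) (v : Char) :
    (S.map (fun c => if k c = v then (l.count c : Int) else 0)).sum = ((l.map k).count v : Int) := by
  induction l with
  | nil => simp
  | cons a l ih =>
      have hsub' : ∀ c ∈ l, c ∈ S := fun c hc => hsub c (List.mem_cons_of_mem _ hc)
      have expand : ∀ c ∈ S, (if k c = v then (((a :: l).count c : Nat) : Int) else 0)
          = (if k c = v then ((l.count c : Nat) : Int) else 0)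
            + (if c = a then (if k a = v then (1:Int) else 0) else 0) := by
        intro c _
        by_cases h1 : k c = v <;> by_cases h2 : c = a <;>
          simp [h1, h2, List.count_cons] <;>
          first
          | exact fun hh => h2 (Eq.symm hh)
          | simp_all
      rw [List.map_congr_left expand, PySem.List.sum_map_add_int,
        ih hsub', pv_sum_indicator S hS a (hsub a List.mem_cons_self) _]
      simp only [List.map_cons, List.count_cons]
      by_cases h : k a = v <;> simp [h]

theorem pv_sum_zero_iff (L : List Int) (h : ∀ x ∈ L, 0 ≤ x) : L.sum = 0 ↔ ∀ x ∈ L, x = 0 := by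
  induction L with
  | nil => simp
  | cons x L ih =>
      have hx := h x List.mem_cons_self
      have hL : ∀ y ∈ L, 0 ≤ y := fun y hy => h y (List.mem_cons_of_mem _ hy)
      have hsum : 0 ≤ L.sum := List.sum_nonneg hL
      rw [List.sum_cons]
      constructor
      · intro he y hy
        have hs0 : L.sum = 0 := by omega
        rcases List.mem_cons.mp hy with rfl | hy'
        · omega
        · exact (ih hL).mp hs0 y hy'
      · intro hall
        have h1 : x = 0 := hall x List.mem_cons_self
        have h2 : L.sum = 0 := (ih hL).mpr (fun y hy => hall y (List.mem_cons_of_mem _ hy))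
        omega

theorem pv_getD_foldl_insert_add (l : List (Char × Int)) (key : Char × Int → Char)
    (d : PySem.Dict Char Int) (v : Char) :
    (l.foldl (fun d p => d.insert (key p) (d.getD (key p) 0 + p.2)) d).getD v 0
      = d.getD v 0 + (l.map (fun p => if key p = v then p.2 else 0)).sum := by
  induction l generalizing d with
  | nil => simp
  | cons q l ih =>
      rw [List.foldl_cons, ih, PySem.Dict.getD_insert]
      by_cases h : v = key q
      · subst h
        simp only [List.map_cons, List.sum_cons]
        simp
        ring
      · rw [if_neg h]
        simp only [List.map_cons, List.sum_cons,
          if_neg (show ¬ key q = v from fun hh => h (Eq.symm hh))]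
        ring

theorem pv_kept_eq (xs : List Char) (sk : PySem.Dict Char Int) (f : Char → Int)
    (h : ∀ c, sk.getD c 0 = f c) (acc : List Char) :
    (xs.foldl (fun st c => if st.1.getD c 0 > 0 then (st.1.insert c (st.1.getD c 0 - 1), st.2) else (st.1, st.2 ++ [c]))
      ((sk, acc) : PySem.Dict Char Int × List Char)).2 = acc ++ pvDrop f xs := by
  induction xs generalizing sk f acc with
  | nil => simp [pvDrop]
  | cons c xs ih =>
      rw [List.foldl_cons]
      by_cases hc : f c > 0
      · dsimp only
        rw [if_pos (show sk.getD c 0 > 0 by rw [h c]; exact hc)]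
        rw [ih (sk.insert c (sk.getD c 0 - 1)) (fun d => if d = c then f c - 1 else f d)
          (fun d => by
            rw [PySem.Dict.getD_insert]
            by_cases hd : d = c
            · simp [hd, h c]
            · simp [hd, h d]) acc]
        conv_rhs => rw [pvDrop]
        rw [if_neg (by omega : ¬ f c ≤ 0)]
      · dsimp only
        rw [if_neg (show ¬ sk.getD c 0 > 0 by rw [h c]; exact hc)]
        rw [ih sk f h (acc ++ [c])]
        conv_rhs => rw [pvDrop]
        rw [if_pos (by omega : f c ≤ 0)]
        simp

theorem pv_contains_eq_false {d : PySem.Dict Char Int} {c : Char} (h : c ∉ d.keys) :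
    d.contains c = false := by
  cases hh : d.contains c
  · rfl
  · exact absurd ((PySem.Dict.contains_iff_mem_keys _ _).mp hh) h

theorem pv_getD_reinsert (r : PySem.Dict Char Int) (hnd : r.keys.Nodup) (val : Char × Int → Int) (c : Char) :
    (r.items.foldl (fun d p => d.insert p.1 (val p)) PySem.Dict.empty).getD c 0
      = if c ∈ r.keys then val (c, r.getD c 0) else 0 := by
  rw [PySem.Dict.items_eq_map_keys r hnd 0]
  rw [show (List.foldl (fun d p => d.insert p.1 (val p)) PySem.Dict.empty (r.keys.map (fun k => (k, r.getD k 0))))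
      = List.foldl (fun d k => d.insert k (val (k, r.getD k 0))) PySem.Dict.empty r.keys from List.foldl_map]
  have hfresh := PySem.Dict.items_foldl_insert_fresh r.keys (fun k => k) (fun k => val (k, r.getD k 0))
    PySem.Dict.empty (fun a _ => PySem.Dict.contains_empty _) (by simpa using hnd)
  by_cases hm : c ∈ r.keys
  · rw [if_pos hm]
    refine PySem.Dict.getD_of_mem_items _ ?_ ?_ 0
    · rw [hfresh]
      exact List.mem_append.mpr (Or.inr (List.mem_map_of_mem hm))
    · exact PySem.Dict.nodup_keys_foldl_insert_key r.keys (fun k => k) (fun _ k => val (k, r.getD k 0))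
        PySem.Dict.empty (by rw [PySem.Dict.keys_empty]; exact List.nodup_nil)
  · rw [if_neg hm]
    apply PySem.Dict.getD_of_not_contains
    apply pv_contains_eq_false
    rw [PySem.Dict.keys_foldl_insert_key r.keys (fun k => k) (fun _ k => val (k, r.getD k 0)) PySem.Dict.empty,
      PySem.Dict.keys_empty, PySem.Set.update_nil_left]
    intro hmem
    exact hm (by simpa using (PySem.Set.mem_ofList _ _).mp hmem)

set_option maxHeartbeats 2000000 in
theorem pv_main (expected predict : String) :
    check_prediction expected predict = check_prediction_alt expected predict := by
  simp only [check_prediction, check_prediction_alt]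
  set xs := expected.toList with hxs
  set ps := predict.toList with hps
  set Ed := List.foldl (fun d c => d.insert c (d.getD c 0 + 1)) (PySem.Dict.empty : PySem.Dict Char Int) xs with hEd
  set Pd := List.foldl (fun d c => d.insert (PySem.Chars.lowerChar c) (d.getD (PySem.Chars.lowerChar c) 0 + 1)) (PySem.Dict.empty : PySem.Dict Char Int) ps with hPd
  set Ld := List.foldl (fun d p => d.insert p.1 (p.2 - min p.2 (Pd.getD p.1 0))) (PySem.Dict.empty : PySem.Dict Char Int) Ed.items with hLd
  set Rd := List.foldl (fun d p => d.insert (PySem.Chars.lowerChar p.1) (d.getD (PySem.Chars.lowerChar p.1) 0 + p.2)) (PySem.Dict.empty : PySem.Dict Char Int) Ld.items with hRd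
  set Sk := List.foldl (fun d p => d.insert p.1 (min (Ed.getD p.1 0) p.2)) (PySem.Dict.empty : PySem.Dict Char Int) Rd.items with hSk
  have hE : ∀ c, Ed.getD c 0 = (xs.count c : Int) := by
    intro c
    rw [hEd, PySem.Dict.getD_foldl_insert_add_one, PySem.Dict.getD_empty, zero_add]
  have hP : ∀ v, Pd.getD v 0 = ((ps.map PySem.Chars.lowerChar).count v : Int) := by
    intro v
    rw [hPd,
      (@List.foldl_map Char Char (PySem.Dict Char Int) PySem.Chars.lowerChar
        (fun d k => d.insert k (d.getD k 0 + 1)) ps PySem.Dict.empty).symm,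
      PySem.Dict.getD_foldl_insert_add_one, PySem.Dict.getD_empty, zero_add]
  have hnd : (Ed.items.map (fun p => p.1)).Nodup := by
    rw [hEd, PySem.Dict.foldl_insert_getD_add_one_eq_counter]
    exact PySem.Dict.nodup_keys_counter xs
  have hLitems : Ld.items = (PySem.Set.ofList xs).map
      (fun c => (c, (xs.count c : Int) - min ((xs.count c : Int)) (Pd.getD c 0))) := by
    rw [hLd, PySem.Dict.items_foldl_insert_fresh Ed.items (fun p => p.1)
      (fun p => p.2 - min p.2 (Pd.getD p.1 0)) PySem.Dict.empty
      (fun a _ => PySem.Dict.contains_empty _) hnd]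
    rw [hEd, PySem.Dict.foldl_insert_getD_add_one_eq_counter, PySem.Dict.items_counter, List.map_map]
    rfl
  have hLvalues : Ld.values = (PySem.Set.ofList xs).map
      (fun c => (xs.count c : Int) - min ((xs.count c : Int)) (Pd.getD c 0)) := by
    show Ld.items.map (fun p => p.2) = _
    rw [hLitems, List.map_map]
    rfl
  have hout : List.foldl pvStepA xs ps
      = pvDrop (fun v => min ((xs.count v : Int)) (((ps.map PySem.Chars.lowerChar).count v) : Int)) xs := by
    have h := pass_eq ps xs (fun _ => (0:Int)) (fun _ => le_refl 0)
    rw [pvDrop_zero xs _ (fun c => min_le_right _ _)] at h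
    rw [h]
    congr 1
    funext v
    rw [zero_add]
  rw [hout]
  set OUT := pvDrop (fun v => min ((xs.count v : Int)) (((ps.map PySem.Chars.lowerChar).count v) : Int)) xs with hOUT
  have hsubS : ∀ c ∈ OUT, c ∈ PySem.Set.ofList xs :=
    fun c hc => (PySem.Set.mem_ofList _ _).mpr (mem_pvDrop _ _ _ hc)
  have hcntOUT : ∀ c, ((OUT.count c : Nat) : Int)
      = (xs.count c : Int) - min ((xs.count c : Int)) (Pd.getD c 0) := by
    intro c
    rw [hOUT, count_pvDrop xs _ (fun c => le_min (Int.natCast_nonneg _) (Int.natCast_nonneg _)) c, hP c]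
    omega
  have hnonneg : ∀ y ∈ Ld.values, 0 ≤ y := by
    rw [hLvalues]
    intro y hy
    obtain ⟨c, _, rfl⟩ := List.mem_map.mp hy
    have hmin : min ((xs.count c : Int)) (Pd.getD c 0) ≤ (xs.count c : Int) := min_le_left _ _
    omega
  have hiff : (OUT.length = 0) ↔ (Ld.values.sum = 0) := by
    rw [List.length_eq_zero_iff, hOUT,
      pvDrop_eq_nil_iff xs _ (fun c => le_min (Int.natCast_nonneg _) (Int.natCast_nonneg _)),
      pv_sum_zero_iff _ hnonneg, hLvalues]
    constructor
    · intro h y hy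
      obtain ⟨c, hcS, rfl⟩ := List.mem_map.mp hy
      have hc := h c ((PySem.Set.mem_ofList _ _).mp hcS)
      rw [hP c]
      omega
    · intro h c hcx
      have hc := h _ (List.mem_map_of_mem ((PySem.Set.mem_ofList _ _).mpr hcx))
      rw [hP c] at hc
      omega
  have hbool : ((OUT.length == 0) : Bool) = (Ld.values.sum == 0) := by
    by_cases hh : OUT.length = 0
    · simp [hh, hiff.mp hh]
    · have h2 : ¬ Ld.values.sum = 0 := fun hz => hh (hiff.mpr hz)
      simp [hh, h2]
  have hRnodupkeys : Rd.keys.Nodup := by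
    rw [hRd]
    exact PySem.Dict.nodup_keys_foldl_insert_key _ (fun (p : Char × Int) => PySem.Chars.lowerChar p.1)
      (fun (d : PySem.Dict Char Int) (p : Char × Int) => d.getD (PySem.Chars.lowerChar p.1) 0 + p.2) _
      (by rw [PySem.Dict.keys_empty]; exact List.nodup_nil)
  have hRv : ∀ v, Rd.getD v 0 = ((OUT.map PySem.Chars.lowerChar).count v : Int) := by
    intro v
    rw [hRd, pv_getD_foldl_insert_add Ld.items (fun (p : Char × Int) => PySem.Chars.lowerChar p.1) PySem.Dict.empty v,
      PySem.Dict.getD_empty, zero_add, hLitems, List.map_map]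
    rw [show ((fun p : Char × Int => if PySem.Chars.lowerChar p.1 = v then p.2 else 0)
          ∘ (fun c => (c, (xs.count c : Int) - min ((xs.count c : Int)) (Pd.getD c 0))))
        = (fun c => if PySem.Chars.lowerChar c = v then (xs.count c : Int) - min ((xs.count c : Int)) (Pd.getD c 0) else 0)
        from rfl]
    rw [← pv_sum_fiber OUT (PySem.Set.ofList xs) (PySem.Set.nodup_ofList xs) hsubS PySem.Chars.lowerChar v]
    apply congrArg List.sum
    apply List.map_congr_left
    intro c _
    rw [hcntOUT c]
  have hSkv : ∀ c, Sk.getD c 0 = min ((xs.count c : Int)) (Rd.getD c 0) := by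
    intro c
    rw [hSk, pv_getD_reinsert Rd hRnodupkeys (fun p => min (Ed.getD p.1 0) p.2) c]
    by_cases hm : c ∈ Rd.keys
    · rw [if_pos hm]
      dsimp only
      rw [hE c]
    · rw [if_neg hm]
      have h0 : Rd.getD c 0 = 0 := PySem.Dict.getD_of_not_contains _ _ (pv_contains_eq_false hm)
      rw [h0, min_eq_right (Int.natCast_nonneg _)]
  have hout2 : List.foldl pvStepA xs OUT
      = pvDrop (fun v => min ((xs.count v : Int)) (((OUT.map PySem.Chars.lowerChar).count v) : Int)) xs := by
    have h := pass_eq OUT xs (fun _ => (0:Int)) (fun _ => le_refl 0)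
    rw [pvDrop_zero xs _ (fun c => min_le_right _ _)] at h
    rw [h]
    congr 1
    funext v
    rw [zero_add]
  have hkept : (List.foldl
      (fun st c => if st.1.getD c 0 > 0 then (st.1.insert c (st.1.getD c 0 - 1), st.2) else (st.1, st.2 ++ [c]))
      (Sk, ([] : List Char)) xs).2 = pvDrop (fun c => Sk.getD c 0) xs := by
    rw [pv_kept_eq xs Sk (fun c => Sk.getD c 0) (fun c => rfl) []]
    rw [List.nil_append]
  have hpred : pvDrop (fun c => Sk.getD c 0) xs
      = pvDrop (fun v => min ((xs.count v : Int)) (((OUT.map PySem.Chars.lowerChar).count v) : Int)) xs := by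
    congr 1
    funext c
    rw [hSkv c, hRv c]
  simp only [Prod.mk.injEq]
  constructor
  · exact hbool
  · apply congrArg
    rw [hout2, hkept, hpred]

-- ===== VERDICT (by name: the statement is the Claim_ definition above) =====
theorem check_prediction_spec : Claim_equal_check_prediction := by
  intro expected predict _
  exact pv_main expected predict
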